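-- pv_equiv track=rewrite | github.com/saifmsaleh/SDM_Telemetry | dashboard/can_dashboard_gui.py | _normalize_line
-- ===== SOURCE A (Python) =====
-- def _normalize_line(line: str) -> str:
--     prefixes = ("AP: ", "STA: ", "UART OUT: ", "UART->STA: ")
--     changed = True
--     while changed:
--         changed = False
--         for prefix in prefixes:
--             if line.startswith(prefix):
--                 line = line[len(prefix):]
--                 changed = True
--     return line.strip()
-- ===== SOURCE B (Python) =====
-- import re
--
-- _PREFIX_RE = re.compile(
--     r'^(?:' + '|'.join(re.escape(p) for p in ("AP: ", "STA: ", "UART OUT: ", "UART->STA: ")) + r')+'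
-- )
--
-- def _normalize_line(line: str) -> str:
--     # Strip any run of known prefixes in one anchored regex pass, then trim.
--     return _PREFIX_RE.sub('', line, count=1).strip()
-- ===== Notes on version B (the rewrite author's own statement) =====
-- stated objective: idiomatic
-- what changed: Replaces the while/for fixpoint loop that repeatedly re-slices the string with a single anchored regex substitution (^(?:p1|p2|p3|p4)+) removing the whole run of prefixes in one pass, then strip().
import Mathlib
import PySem

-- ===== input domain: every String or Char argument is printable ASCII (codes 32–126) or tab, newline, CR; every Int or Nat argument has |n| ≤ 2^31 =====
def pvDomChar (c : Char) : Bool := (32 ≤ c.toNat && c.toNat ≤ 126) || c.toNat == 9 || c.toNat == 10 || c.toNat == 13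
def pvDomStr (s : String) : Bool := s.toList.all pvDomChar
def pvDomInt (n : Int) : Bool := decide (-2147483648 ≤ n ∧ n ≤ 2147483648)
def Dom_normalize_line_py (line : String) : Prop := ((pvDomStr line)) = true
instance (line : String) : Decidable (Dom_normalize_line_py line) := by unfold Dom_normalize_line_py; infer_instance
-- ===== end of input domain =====

-- B replaces A's while/for fixpoint loop with one anchored regex pass stripping the whole
-- run of known prefixes at once, then strip(); ports agree on the return value everywhere.


-- ===== PORT A =====
-- the fixed prefix tuple ("AP: ", "STA: ", "UART OUT: ", "UART->STA: ") as char lists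
def pfx1 : List Char := ['A','P',':',' ']
def pfx2 : List Char := ['S','T','A',':',' ']
def pfx3 : List Char := ['U','A','R','T',' ','O','U','T',':',' ']
def pfx4 : List Char := ['U','A','R','T','-','>','S','T','A',':',' ']
def pyPrefixes : List (List Char) := [pfx1, pfx2, pfx3, pfx4]

-- body of A's inner `for prefix in prefixes` loop (state = (line, changed))
def tryStrip (st : List Char × Bool) (p : List Char) : List Char × Bool :=
  if p.isPrefixOf st.1 then (st.1.drop p.length, true) else st

-- one `for` pass over the prefixes, starting with changed = False
def forPass (l : List Char) : List Char × Bool :=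
  pyPrefixes.foldl tryStrip (l, false)

-- branch equations for tryStrip (keep the folds readable in the proofs)
theorem tryStrip_pos {p l : List Char} {b : Bool} (h : p.isPrefixOf l = true) :
    tryStrip (l, b) p = (l.drop p.length, true) := by simp [tryStrip, h]

theorem tryStrip_neg {p l : List Char} {b : Bool} (h : ¬ p.isPrefixOf l = true) :
    tryStrip (l, b) p = (l, b) := by simp [tryStrip]; intro hc; simp [hc] at h

-- a fired branch only shrinks the line (used for `while` termination and the main induction)
theorem foldl_tryStrip_le (ps : List (List Char)) (st : List Char × Bool) :
    (ps.foldl tryStrip st).1.length ≤ st.1.length := by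
  induction ps generalizing st with
  | nil => exact le_rfl
  | cons p ps ih =>
      obtain ⟨sl, sb⟩ := st
      simp only [List.foldl_cons]
      refine le_trans (ih _) ?_
      by_cases h : p.isPrefixOf sl = true
      · rw [tryStrip_pos h]; simp
      · rw [tryStrip_neg h]

theorem foldl_tryStrip_lt (ps : List (List Char)) (hps : ∀ p ∈ ps, p ≠ []) (l : List Char)
    (h : (ps.foldl tryStrip (l, false)).2 = true) :
    (ps.foldl tryStrip (l, false)).1.length < l.length := by
  induction ps generalizing l with
  | nil => simp at h
  | cons p ps ih =>
      simp only [List.foldl_cons] at h ⊢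
      by_cases hm : p.isPrefixOf l = true
      · rw [tryStrip_pos hm] at h ⊢
        have hle := foldl_tryStrip_le ps (l.drop p.length, true)
        simp only at hle
        have hplen : 1 ≤ p.length := by
          have : p ≠ [] := hps p (by simp)
          cases p <;> simp_all
        have hlen : p.length ≤ l.length := (List.isPrefixOf_iff_prefix.mp hm).length_le
        simp only [List.length_drop] at hle
        omega
      · rw [tryStrip_neg hm] at h ⊢
        exact ih (fun q hq => hps q (by simp [hq])) l h

-- A's `while changed:` loop
def whileLoop (l : List Char) : List Char :=
  let st := forPass l
  if h : st.2 = true then whileLoop st.1 else st.1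
termination_by l.length
decreasing_by
  exact foldl_tryStrip_lt pyPrefixes (by decide) l h

def normalize_line_py (line : String) : String :=
  String.ofList (PySem.Chars.strip (whileLoop line.toList))

-- ===== PORT B =====
-- Hand port of Source B's `_PREFIX_RE.sub('', line, count=1)` with _PREFIX_RE = ^(?:AP: |STA: |UART OUT: |UART->STA: )+ :
-- the anchored greedy repetition of the alternation matches exactly the longest run of
-- prefixes at the front (alternatives tried in order; no following pattern, so no
-- backtracking), so the sub drops `matchLen` characters. Exact for this fixed pattern.
def matchLen (l : List Char) : Nat :=
  if pfx1.isPrefixOf l then pfx1.length + matchLen (l.drop pfx1.length)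
  else if pfx2.isPrefixOf l then pfx2.length + matchLen (l.drop pfx2.length)
  else if pfx3.isPrefixOf l then pfx3.length + matchLen (l.drop pfx3.length)
  else if pfx4.isPrefixOf l then pfx4.length + matchLen (l.drop pfx4.length)
  else 0
termination_by l.length
decreasing_by
  all_goals
    rename_i h
    have := (List.isPrefixOf_iff_prefix.mp h).length_le
    simp only [List.length_drop, pfx1, pfx2, pfx3, pfx4, List.length_cons, List.length_nil] at *
    omega

def normalize_line_py_alt (line : String) : String :=
  String.ofList (PySem.Chars.strip (line.toList.drop (matchLen line.toList)))

-- ===== PRECONDITION & SPEC =====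
def Spec_normalize_line_py (line : String) (out : String) : Prop := out = normalize_line_py_alt line
instance (line : String) (out : String) : Decidable (Spec_normalize_line_py line out) := by unfold Spec_normalize_line_py; infer_instance

-- ===== CLAIM (what is proved, stated in full; the proofs are below) =====
def Claim_equal_normalize_line_py : Prop := ∀ (line : String), Dom_normalize_line_py line → Spec_normalize_line_py line (normalize_line_py line)

-- ===== LEMMAS AND PROOFS =====

-- no two distinct prefixes can match at the same position (none is a prefix of another)
theorem prefixes_exclusive : ∀ p ∈ pyPrefixes, ∀ q ∈ pyPrefixes, p ≠ q → ¬ p <+: q := by decide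

theorem excl {p q l : List Char} (hp : p ∈ pyPrefixes) (hq : q ∈ pyPrefixes) (hne : p ≠ q)
    (hm : p.isPrefixOf l = true) : q.isPrefixOf l = false := by
  by_contra h
  have hq' : q <+: l := List.isPrefixOf_iff_prefix.mp (by simpa using h)
  have hp' : p <+: l := List.isPrefixOf_iff_prefix.mp hm
  rcases List.prefix_or_prefix_of_prefix hp' hq' with hc | hc
  · exact prefixes_exclusive p hp q hq hne hc
  · exact prefixes_exclusive q hq p hp (Ne.symm hne) hc

-- stripping one matching prefix accounts for exactly its length of the greedy match
theorem matchLen_step {p l : List Char} (hp : p ∈ pyPrefixes) (hm : p.isPrefixOf l = true) :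
    matchLen l = p.length + matchLen (l.drop p.length) := by
  fin_cases hp
  · rw [matchLen]; simp [hm]
  · rw [matchLen]
    simp [hm, excl (p := pfx2) (q := pfx1) (by decide) (by decide) (by decide) hm]
  · rw [matchLen]
    simp [hm, excl (p := pfx3) (q := pfx1) (by decide) (by decide) (by decide) hm,
          excl (p := pfx3) (q := pfx2) (by decide) (by decide) (by decide) hm]
  · rw [matchLen]
    simp [hm, excl (p := pfx4) (q := pfx1) (by decide) (by decide) (by decide) hm,
          excl (p := pfx4) (q := pfx2) (by decide) (by decide) (by decide) hm,
          excl (p := pfx4) (q := pfx3) (by decide) (by decide) (by decide) hm]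

-- the fully-stripped normal form is invariant under stripping one matching prefix
theorem drop_matchLen_step {p l : List Char} (hp : p ∈ pyPrefixes) (hm : p.isPrefixOf l = true) :
    (l.drop p.length).drop (matchLen (l.drop p.length)) = l.drop (matchLen l) := by
  rw [List.drop_drop, matchLen_step hp hm, Nat.add_comm]

-- a whole `for` pass preserves the normal form
theorem foldl_tryStrip_NF (ps : List (List Char)) (hps : ∀ p ∈ ps, p ∈ pyPrefixes)
    (st : List Char × Bool) :
    (ps.foldl tryStrip st).1.drop (matchLen (ps.foldl tryStrip st).1)
      = st.1.drop (matchLen st.1) := by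
  induction ps generalizing st with
  | nil => rfl
  | cons p ps ih =>
      obtain ⟨sl, sb⟩ := st
      simp only [List.foldl_cons]
      rw [ih (fun q hq => hps q (by simp [hq]))]
      by_cases hm : p.isPrefixOf sl = true
      · rw [tryStrip_pos hm]
        exact drop_matchLen_step (hps p (by simp)) hm
      · rw [tryStrip_neg hm]

-- the flag never resets
theorem foldl_tryStrip_flag (ps : List (List Char)) (st : List Char × Bool) (h : st.2 = true) :
    (ps.foldl tryStrip st).2 = true := by
  induction ps generalizing st with
  | nil => exact h
  | cons p ps ih =>
      obtain ⟨sl, sb⟩ := st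
      simp only [List.foldl_cons]
      refine ih _ ?_
      by_cases hm : p.isPrefixOf sl = true
      · rw [tryStrip_pos hm]
      · rw [tryStrip_neg hm]; exact h

-- if a pass reports no change, nothing matched and the line is unchanged
theorem foldl_tryStrip_false (ps : List (List Char)) (l : List Char)
    (h : (ps.foldl tryStrip (l, false)).2 = false) :
    (ps.foldl tryStrip (l, false)).1 = l ∧ ∀ p ∈ ps, p.isPrefixOf l = false := by
  induction ps generalizing l with
  | nil => simp
  | cons p ps ih =>
      simp only [List.foldl_cons] at h ⊢
      by_cases hm : p.isPrefixOf l = true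
      · rw [tryStrip_pos hm] at h
        rw [foldl_tryStrip_flag ps _ rfl] at h; cases h
      · rw [tryStrip_neg hm] at h ⊢
        rcases ih l h with ⟨h1, h2⟩
        refine ⟨h1, ?_⟩
        intro q hq
        rcases List.mem_cons.mp hq with rfl | hq'
        · exact Bool.eq_false_iff.mpr hm
        · exact h2 q hq'

-- if nothing matches, the greedy match is empty
theorem matchLen_eq_zero {l : List Char} (h : ∀ p ∈ pyPrefixes, p.isPrefixOf l = false) :
    matchLen l = 0 := by
  rw [matchLen]
  simp [h pfx1 (by decide), h pfx2 (by decide), h pfx3 (by decide), h pfx4 (by decide)]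

-- A's while loop computes B's one-shot drop
theorem whileLoop_eq : ∀ n l, l.length ≤ n → whileLoop l = l.drop (matchLen l) := by
  intro n
  induction n with
  | zero =>
      intro l hl
      have : l = [] := by cases l <;> simp_all
      subst this
      rw [whileLoop, matchLen]
      decide
  | succ n ih =>
      intro l hl
      rw [whileLoop]
      simp only [forPass]
      split_ifs with h
      · have hlt := foldl_tryStrip_lt pyPrefixes (by decide) l h
        rw [ih _ (by omega)]
        exact foldl_tryStrip_NF pyPrefixes (fun p hp => hp) (l, false)
      · rcases foldl_tryStrip_false pyPrefixes l (by simpa using h) with ⟨h1, h2⟩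
        rw [h1, matchLen_eq_zero h2, List.drop_zero]

-- ===== VERDICT (by name: the statement is the Claim_ definition above) =====
theorem normalize_line_py_spec : Claim_equal_normalize_line_py := by
  intro line _
  unfold Spec_normalize_line_py normalize_line_py normalize_line_py_alt
  rw [whileLoop_eq line.toList.length line.toList le_rfl]
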